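-- pv_equiv track=rewrite | github.com/Villone96/genona_building | Assignment/Code/readsOperation.py | trimOperation
-- ===== SOURCE A (Python) =====
-- from operator import itemgetter
--
-- def trimOperation(qualityString, qualityValue, lengthValue):
--
--     # initialization of list for all possible substring interval
--     subString = []
--
--     # start index
--     start = 0
--
--     # end index
--     end = 0
--
--     # flag about possibility of all intervall return (from first to end of qualityString)
--     flag = False
--
--     for i in range(0, len(qualityString)-1):
--         # if the char phared value is < of quality user value
--         if convertASCIIToDecimal(qualityString[i]) < qualityValue:
--             # if the indexes are overlap
--             if end - start == 0:
--                 end = i + 1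
--                 start = i + 1
--             else:
--                 # otherwise append the triple
--                 subString.append([start, end , end - start])
--                 end = i + 1
--                 start = i + 1
--         else:
--             flag = True
--             end += 1
--
--     # if the flag is yet false means that no one char has a phred value > of quality
--     if not flag:
--         return None
--
--     # if the substring is empy but flag is true (all chars have a phred value > of qualityValue)
--     if subString == [] and flag:
--         # if the qualitySatring is less long of lenghtValue is impossible done trimming
--         if len(qualityString) - 1 < lengthValue:
--             return None
--         else:
--             # otherwise return from first index to last
--     	    return [0, len(qualityString), len(qualityString) - 1]
--     else:
--         # in the case of different intervals in the quality String take longest one and, if it is longer than length Value, return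
--         # otherwise is impossible done trimming
--         LongSubString = sorted(subString, key = itemgetter(2))[-1]
--         if LongSubString[1] - LongSubString[0] < lengthValue:
--             return None
--         else:
--             return LongSubString
--
-- def convertASCIIToDecimal(ASCIILetter):
-- 	decimalValue = ord(ASCIILetter) - 33
-- 	return decimalValue
-- ===== SOURCE B (Python) =====
-- def trimOperation(qualityString, qualityValue, lengthValue):
--     # single pass: track current run of good chars and the best closed interval (last on ties)
--     n = len(qualityString)
--     best = None
--     run_start = 0
--     cur = 0
--     any_good = False
--     for i in range(n - 1):
--         if ord(qualityString[i]) - 33 < qualityValue: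
--             if cur > 0 and (best is None or cur >= best[2]):
--                 best = [run_start, run_start + cur, cur]
--             run_start = i + 1
--             cur = 0
--         else:
--             any_good = True
--             cur += 1
--     if not any_good:
--         return None
--     if best is None:
--         if n - 1 < lengthValue:
--             return None
--         return [0, n, n - 1]
--     if best[2] < lengthValue:
--         return None
--     return best
-- ===== Notes on version B (the rewrite author's own statement) =====
-- stated objective: alternative
-- what changed: B replaces A's collect-all-intervals-into-a-list-then-sort-and-take-last pass by a single pass that keeps only the best (longest, last on ties) closed interval and the current run length; measured ~1.3-1.7x on large inputs, below the 1.5x confirmation bar, so no speed is claimed.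
import Mathlib
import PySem

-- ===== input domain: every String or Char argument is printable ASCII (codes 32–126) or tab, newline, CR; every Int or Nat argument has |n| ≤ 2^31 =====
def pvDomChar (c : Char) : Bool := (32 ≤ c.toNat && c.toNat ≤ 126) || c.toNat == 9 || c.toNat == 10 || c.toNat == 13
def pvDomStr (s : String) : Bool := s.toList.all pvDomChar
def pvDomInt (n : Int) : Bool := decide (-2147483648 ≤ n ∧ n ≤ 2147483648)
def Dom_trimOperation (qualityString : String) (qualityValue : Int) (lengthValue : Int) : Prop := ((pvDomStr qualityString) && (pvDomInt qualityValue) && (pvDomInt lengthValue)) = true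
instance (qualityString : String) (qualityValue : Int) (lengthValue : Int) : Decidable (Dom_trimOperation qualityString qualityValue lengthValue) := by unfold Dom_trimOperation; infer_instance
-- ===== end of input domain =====

-- B replaces A's collect-all-intervals-then-sort pass by a single pass that keeps the
-- best (longest, last on ties) closed interval as it goes; both agree on every input.

-- ===== PORT A =====
def convertASCIIToDecimal (ASCIILetter : Char) : Int := (ASCIILetter.toNat : Int) - 33

-- the body of A's 'for i in range(0, len(qualityString)-1)' loop; state = (subString, start, end, flag)
def trimStepA (qualityValue : Int) (cs : List Char)
    (acc : List (Int × Int × Int) × Int × Int × Bool) (i : Int) :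
    List (Int × Int × Int) × Int × Int × Bool :=
  match acc with
  | (subString, start, end_, flag) =>
    if convertASCIIToDecimal (PySem.List.pyGetD cs i ' ') < qualityValue then
      if end_ - start == 0 then (subString, i + 1, i + 1, flag)
      else (subString ++ [(start, end_, end_ - start)], i + 1, i + 1, flag)
    else (subString, start, end_ + 1, true)

def trimOperation (qualityString : String) (qualityValue : Int) (lengthValue : Int) : Option (List Int) :=
  match (PySem.List.pyRange 0 (PySem.Str.len qualityString - 1) 1).foldl
      (trimStepA qualityValue qualityString.toList) ([], 0, 0, false) with
  | (subString, _, _, flag) =>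
    if !flag then none
    else if subString == [] && flag then
      if PySem.Str.len qualityString - 1 < lengthValue then none
      else some [0, PySem.Str.len qualityString, PySem.Str.len qualityString - 1]
    else
      -- sorted(subString, key=itemgetter(2))[-1]; subString ≠ [] here, so [-1] cannot raise
      match PySem.List.pyGet? (PySem.List.sorted subString (fun t => t.2.2)) (-1) with
      | none => none
      | some longSubString =>
        if longSubString.2.1 - longSubString.1 < lengthValue then none
        else some [longSubString.1, longSubString.2.1, longSubString.2.2]

-- ===== PORT B =====
-- the body of B's single-pass loop; state = (best, run_start, cur, any_good)
def trimStepB (qualityValue : Int) (cs : List Char)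
    (acc : Option (Int × Int × Int) × Int × Int × Bool) (i : Int) :
    Option (Int × Int × Int) × Int × Int × Bool :=
  match acc with
  | (best, runStart, cur, anyGood) =>
    if ((PySem.List.pyGetD cs i ' ').toNat : Int) - 33 < qualityValue then
      (if (decide (0 < cur) && (match best with | none => true | some u => decide (u.2.2 ≤ cur))) then
          some (runStart, runStart + cur, cur)
        else best, i + 1, 0, anyGood)
    else (best, runStart, cur + 1, true)

def trimOperation_alt (qualityString : String) (qualityValue : Int) (lengthValue : Int) : Option (List Int) :=
  match (PySem.List.pyRange 0 (PySem.Str.len qualityString - 1) 1).foldl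
      (trimStepB qualityValue qualityString.toList) (none, 0, 0, false) with
  | (best, _, _, anyGood) =>
    if !anyGood then none
    else
      match best with
      | none =>
        if PySem.Str.len qualityString - 1 < lengthValue then none
        else some [0, PySem.Str.len qualityString, PySem.Str.len qualityString - 1]
      | some b =>
        if b.2.2 < lengthValue then none else some [b.1, b.2.1, b.2.2]

-- ===== PRECONDITION & SPEC =====
def Spec_trimOperation (qualityString : String) (qualityValue : Int) (lengthValue : Int) (out : Option (List Int)) : Prop := out = trimOperation_alt qualityString qualityValue lengthValue
instance (qualityString : String) (qualityValue : Int) (lengthValue : Int) (out : Option (List Int)) : Decidable (Spec_trimOperation qualityString qualityValue lengthValue out) := by unfold Spec_trimOperation; infer_instance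

-- ===== CLAIM (what is proved, stated in full; the proofs are below) =====
def Claim_equal_trimOperation : Prop := ∀ (qualityString : String) (qualityValue : Int) (lengthValue : Int), Dom_trimOperation qualityString qualityValue lengthValue → Spec_trimOperation qualityString qualityValue lengthValue (trimOperation qualityString qualityValue lengthValue)

-- ===== LEMMAS AND PROOFS =====

-- "keep the later interval on equal lengths": one step of B's best-update, as a fold step
def updBest (b : Option (Int × Int × Int)) (t : Int × Int × Int) : Option (Int × Int × Int) :=
  match b with
  | none => some t
  | some u => if u.2.2 ≤ t.2.2 then some t else some u

theorem foldl_updBest_some (l : List (Int × Int × Int)) (u : Int × Int × Int) :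
    ∃ v, l.foldl updBest (some u) = some v := by
  induction l generalizing u with
  | nil => exact ⟨u, rfl⟩
  | cons x t ih =>
    simp only [List.foldl_cons, updBest]
    split_ifs <;> exact ih _

theorem mem_of_foldl_updBest (l : List (Int × Int × Int)) (b : Option (Int × Int × Int))
    (u : Int × Int × Int) (h : l.foldl updBest b = some u) : b = some u ∨ u ∈ l := by
  induction l generalizing b with
  | nil => exact Or.inl h
  | cons x t ih =>
    rcases ih _ h with h' | h'
    · rcases b with _ | v
      · simp only [updBest] at h'
        have : x = u := by injection h'
        exact Or.inr (by simp [this])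
      · simp only [updBest] at h'
        by_cases hv : v.2.2 ≤ x.2.2
        · rw [if_pos hv] at h'
          have : x = u := by injection h'
          exact Or.inr (by simp [this])
        · rw [if_neg hv] at h'
          exact Or.inl h'
    · exact Or.inr (List.mem_cons_of_mem _ h')

theorem getLast?_insertBy (x : Int × Int × Int) (ys : List (Int × Int × Int))
    (h : ys.Pairwise (fun a b => a.2.2 ≤ b.2.2)) :
    (PySem.List.insertBy (fun a b => decide (a.2.2 < b.2.2)) x ys).getLast? = updBest ys.getLast? x := by
  induction ys with
  | nil => simp [PySem.List.insertBy, updBest]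
  | cons y t ih =>
    rw [List.pairwise_cons] at h
    rw [PySem.List.insertBy]
    by_cases hlt : x.2.2 < y.2.2
    · rw [if_pos (by simpa using hlt)]
      have hyt : (y :: t).getLast? = some ((y :: t).getLast (by simp)) :=
        List.getLast?_eq_some_getLast (by simp)
      have hmem : (y :: t).getLast (by simp) ∈ y :: t := List.getLast_mem _
      have hle : y.2.2 ≤ ((y :: t).getLast (by simp)).2.2 := by
        rcases List.mem_cons.1 hmem with hh | hh
        · rw [hh]
        · exact h.1 _ hh
      rw [List.getLast?_cons_cons, hyt]
      simp only [updBest]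
      rw [if_neg (by omega)]
    · rw [if_neg (by simpa using hlt)]
      cases t with
      | nil =>
        simp only [PySem.List.insertBy, updBest]
        simp only [List.getLast?_cons_cons, List.getLast?_singleton]
        rw [if_pos (by omega)]
      | cons z t' =>
        have hrec := ih h.2
        have hne : PySem.List.insertBy (fun a b => decide (a.2.2 < b.2.2)) x (z :: t') ≠ [] := by
          intro hc
          have hx := (PySem.List.mem_insertBy (fun a b => decide (a.2.2 < b.2.2)) x x (z :: t')).2 (Or.inl rfl)
          rw [hc] at hx
          simp at hx
        obtain ⟨w, ws, hws⟩ := List.exists_cons_of_ne_nil hne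
        rw [hws, List.getLast?_cons_cons, ← hws, hrec, List.getLast?_cons_cons]

theorem insertBy_pairwise (x : Int × Int × Int) (ys : List (Int × Int × Int))
    (h : ys.Pairwise (fun a b => a.2.2 ≤ b.2.2)) :
    (PySem.List.insertBy (fun a b => decide (a.2.2 < b.2.2)) x ys).Pairwise (fun a b => a.2.2 ≤ b.2.2) := by
  induction ys with
  | nil => simp [PySem.List.insertBy]
  | cons y t ih =>
    rw [List.pairwise_cons] at h
    rw [PySem.List.insertBy]
    by_cases hlt : x.2.2 < y.2.2
    · rw [if_pos (by simpa using hlt)]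
      refine List.pairwise_cons.2 ⟨?_, List.pairwise_cons.2 h⟩
      intro z hz
      rcases List.mem_cons.1 hz with rfl | hz
      · omega
      · have := h.1 _ hz
        omega
    · rw [if_neg (by simpa using hlt)]
      refine List.pairwise_cons.2 ⟨?_, ih h.2⟩
      intro z hz
      rcases (PySem.List.mem_insertBy _ _ _ _).1 hz with rfl | hz
      · omega
      · exact h.1 _ hz

theorem foldl_ins_getLast (l : List (Int × Int × Int)) :
    ∀ acc : List (Int × Int × Int), acc.Pairwise (fun a b => a.2.2 ≤ b.2.2) →
    (l.foldl (fun acc x => PySem.List.insertBy (fun a b => decide (a.2.2 < b.2.2)) x acc) acc).Pairwise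
      (fun a b => a.2.2 ≤ b.2.2) ∧
    (l.foldl (fun acc x => PySem.List.insertBy (fun a b => decide (a.2.2 < b.2.2)) x acc) acc).getLast? =
      l.foldl updBest acc.getLast? := by
  induction l with
  | nil => exact fun acc h => ⟨h, rfl⟩
  | cons x t ih =>
    intro acc h
    have h2 := ih _ (insertBy_pairwise x acc h)
    rw [getLast?_insertBy x acc h] at h2
    simpa only [List.foldl_cons] using h2

theorem sorted_getLast (l : List (Int × Int × Int)) :
    (PySem.List.sorted l (fun t => t.2.2)).getLast? = l.foldl updBest none := by
  rw [PySem.List.sorted_eq_foldl_insertBy]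
  simpa using (foldl_ins_getLast l [] (by simp)).2

theorem pyGet_neg_one_eq_getLast? {α : Type} (l : List α) (h : l ≠ []) :
    PySem.List.pyGet? l (-1) = l.getLast? := by
  have hlen : 1 ≤ l.length := List.length_pos_iff.2 h
  simp only [PySem.List.pyGet?, PySem.List.pyIdx?]
  rw [if_neg (by omega), if_pos (by omega)]
  rw [List.getLast?_eq_getElem?]
  congr 1

-- the loop invariant tying A's state to B's state
def TrimRel (a : List (Int × Int × Int) × Int × Int × Bool)
    (b : Option (Int × Int × Int) × Int × Int × Bool) : Prop :=
  a.2.1 = b.2.1 ∧ a.2.2.1 = b.2.1 + b.2.2.1 ∧ 0 ≤ b.2.2.1 ∧ a.2.2.2 = b.2.2.2 ∧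
  b.1 = a.1.foldl updBest none ∧ (∀ t ∈ a.1, t.2.1 - t.1 = t.2.2)

theorem trimStep_rel (q : Int) (cs : List Char) (i : Int)
    (a : List (Int × Int × Int) × Int × Int × Bool)
    (b : Option (Int × Int × Int) × Int × Int × Bool) (h : TrimRel a b) :
    TrimRel (trimStepA q cs a i) (trimStepB q cs b i) := by
  obtain ⟨sub, st, en, fl⟩ := a
  obtain ⟨best, rs, cur, ag⟩ := b
  obtain ⟨h1, h2, h3, h4, h5, h6⟩ := h
  simp only at h1 h2 h3 h4 h5 h6
  subst h1 h4 h2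
  simp only [trimStepA, trimStepB, convertASCIIToDecimal]
  by_cases hc : ((PySem.List.pyGetD cs i ' ').toNat : Int) - 33 < q
  · rw [if_pos hc, if_pos hc]
    by_cases hz : cur = 0
    · rw [if_pos (by simp [hz]), if_neg (by simp [hz])]
      exact ⟨rfl, by dsimp only; omega, le_refl 0, rfl, h5, h6⟩
    · rw [if_neg (by simp; omega)]
      rcases best with _ | u
      · rw [if_pos (by simp; omega)]
        refine ⟨rfl, by dsimp only; omega, le_refl 0, rfl, ?_, ?_⟩
        · simp only [List.foldl_append, List.foldl_cons, List.foldl_nil]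
          rw [← h5]
          dsimp only [updBest]
          have hsc : st + cur - st = cur := by omega
          rw [hsc]
        · intro t ht
          rcases List.mem_append.1 ht with ht | ht
          · exact h6 t ht
          · simp only [List.mem_singleton] at ht
            subst ht
            rfl
      · by_cases hu : u.2.2 ≤ cur
        · rw [if_pos (by simp [hu]; omega)]
          refine ⟨rfl, by dsimp only; omega, le_refl 0, rfl, ?_, ?_⟩
          · simp only [List.foldl_append, List.foldl_cons, List.foldl_nil]
            rw [← h5]
            simp only [updBest]
            rw [if_pos (by omega)]
            have hsc : st + cur - st = cur := by omega
            rw [hsc]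
          · intro t ht
            rcases List.mem_append.1 ht with ht | ht
            · exact h6 t ht
            · simp only [List.mem_singleton] at ht
              subst ht
              rfl
        · rw [if_neg (by simp [hu])]
          refine ⟨rfl, by dsimp only; omega, le_refl 0, rfl, ?_, ?_⟩
          · simp only [List.foldl_append, List.foldl_cons, List.foldl_nil]
            rw [← h5]
            simp only [updBest]
            rw [if_neg (by omega)]
          · intro t ht
            rcases List.mem_append.1 ht with ht | ht
            · exact h6 t ht
            · simp only [List.mem_singleton] at ht
              subst ht
              rfl
  · rw [if_neg hc, if_neg hc]
    exact ⟨rfl, by dsimp only; omega, by dsimp only; omega, rfl, h5, h6⟩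

theorem foldl_trim_rel (q : Int) (cs : List Char) (idxs : List Int)
    (a : List (Int × Int × Int) × Int × Int × Bool)
    (b : Option (Int × Int × Int) × Int × Int × Bool) (h : TrimRel a b) :
    TrimRel (idxs.foldl (trimStepA q cs) a) (idxs.foldl (trimStepB q cs) b) := by
  induction idxs generalizing a b with
  | nil => exact h
  | cons i t ih => exact ih _ _ (trimStep_rel q cs i a b h)

theorem foldl_updBest_none_eq_none_iff (l : List (Int × Int × Int)) :
    l.foldl updBest none = none ↔ l = [] := by
  cases l with
  | nil => simp
  | cons x t =>
    simp only [List.foldl_cons, updBest]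
    obtain ⟨v, hv⟩ := foldl_updBest_some t x
    simp [hv]

-- ===== VERDICT (by name: the statement is the Claim_ definition above) =====
theorem trimOperation_spec : Claim_equal_trimOperation := by
  intro s q L _
  unfold Spec_trimOperation trimOperation trimOperation_alt
  have hrel := foldl_trim_rel q s.toList (PySem.List.pyRange 0 (PySem.Str.len s - 1) 1)
    ([], 0, 0, false) (none, 0, 0, false)
    ⟨rfl, by simp, le_refl 0, rfl, rfl, by simp⟩
  set a := (PySem.List.pyRange 0 (PySem.Str.len s - 1) 1).foldl (trimStepA q s.toList) ([], 0, 0, false) with ha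
  set b := (PySem.List.pyRange 0 (PySem.Str.len s - 1) 1).foldl (trimStepB q s.toList) (none, 0, 0, false) with hb
  obtain ⟨sub, st, en, fl⟩ := a
  obtain ⟨best, rs, cur, ag⟩ := b
  obtain ⟨h1, h2, h3, h4, h5, h6⟩ := hrel
  simp only at h1 h2 h3 h4 h5 h6
  subst h4
  cases fl with
  | false => dsimp only; simp
  | true =>
    have hnot : ¬((!true) = true) := by simp
    dsimp only
    rw [if_neg hnot, if_neg hnot]
    by_cases hsub : sub = []
    · subst hsub
      simp only [List.foldl_nil] at h5
      subst h5
      simp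
    · rw [if_neg (by simp [hsub])]
      have hbne : List.foldl updBest none sub ≠ none :=
        fun hcon => hsub ((foldl_updBest_none_eq_none_iff sub).1 hcon)
      rcases hbest : best with _ | u
      · rw [hbest] at h5
        exact absurd h5.symm hbne
      · have hsne : PySem.List.sorted sub (fun t => t.2.2) ≠ [] := by
          intro hcon
          rw [PySem.List.sorted_eq_nil_iff] at hcon
          exact hsub hcon
        rw [pyGet_neg_one_eq_getLast? _ hsne, sorted_getLast, ← h5, hbest]
        have humem : u ∈ sub := by
          rcases mem_of_foldl_updBest sub none u (by rw [← h5, hbest]) with h' | h'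
          · exact absurd h'.symm (by simp)
          · exact h'
        have hu := h6 u humem
        simp only
        rw [hu]
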